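-- pv_equiv track=rewrite | github.com/nhh2907/Python_For_Everyone | team_Mission/team_Mission_4.4.py | check_id_format
-- ===== SOURCE A (Python) =====
-- def check_id_format(id_user):
-- 	scope = [str(i) for i in range(0, 5)]
--
-- 	# 주민등록번호가 숫자와 대쉬로만 되어있는지 확인
-- 	for i in id_user:
-- 		if not i.isdigit() and i != '-':
-- 			return False
--
-- 	# 추가 조건 확인
-- 	if len(id_user) != 14 \
-- 		or id_user[2] not in scope[:2] \
-- 		or id_user[4] not in scope[:5] \
-- 		or id_user.count('-') != 1 \
-- 		or id_user[6] != '-' \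
-- 		or id_user[7] not in scope[1:]:
-- 		return False
--
-- 	return True
-- ===== SOURCE B (Python) =====
-- def check_id_format(id_user):
--     if len(id_user) != 14:
--         return False
--     allowed = {2: '01', 4: '01234', 6: '-', 7: '1234'}
--     for idx, ch in enumerate(id_user):
--         req = allowed.get(idx)
--         if req is not None:
--             if ch not in req:
--                 return False
--         elif not ch.isdigit():
--             return False
--     return True
-- ===== Notes on version B (the rewrite author's own statement) =====
-- stated objective: simpler
-- what changed: Replaces A's whole-string scan plus a six-clause guard (length, two indexed membership checks, a dash count, two more indexed checks) by a length guard followed by one indexed pass consulting a per-position constraints table; the dash-count check disappears because the table pins the sole dash to index 6.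
import Mathlib
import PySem

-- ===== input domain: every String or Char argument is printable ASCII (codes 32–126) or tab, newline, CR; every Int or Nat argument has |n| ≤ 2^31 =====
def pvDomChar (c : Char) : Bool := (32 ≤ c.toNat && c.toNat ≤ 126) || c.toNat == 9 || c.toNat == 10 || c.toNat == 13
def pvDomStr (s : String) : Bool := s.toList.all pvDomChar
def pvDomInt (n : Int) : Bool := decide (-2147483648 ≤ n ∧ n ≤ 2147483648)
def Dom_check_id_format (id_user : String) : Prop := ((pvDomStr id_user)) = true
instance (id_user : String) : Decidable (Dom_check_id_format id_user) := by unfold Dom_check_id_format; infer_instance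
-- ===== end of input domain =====

-- B replaces A's whole-string character scan plus six-clause guard (with a dash count) by a
-- length guard and a single indexed pass over a per-position constraints table (objective: simpler).

-- ===== PORT A =====
def pvLoopA : List Char → Bool
  | [] => true
  | c :: rest => if !(PySem.Chars.isdigit c) && c != '-' then false else pvLoopA rest

def check_id_format (id_user : String) : Bool :=
  let scope : List String := (PySem.List.pyRange 0 5 1).map PySem.Int.toStr
  let cs := id_user.toList
  if pvLoopA cs = false then false
  else if (PySem.Str.len id_user != 14)
      || !((PySem.List.slice scope none (some 2)).contains (String.ofList [PySem.List.pyGetD cs 2 ' ']))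
      || !((PySem.List.slice scope none (some 5)).contains (String.ofList [PySem.List.pyGetD cs 4 ' ']))
      || (PySem.Str.count id_user "-" != 1)
      || (PySem.List.pyGetD cs 6 ' ' != '-')
      || !((PySem.List.slice scope (some 1) none).contains (String.ofList [PySem.List.pyGetD cs 7 ' ']))
  then false else true

-- ===== PORT B =====
def pvTable : PySem.Dict Int String :=
  PySem.Dict.ofList [(2, "01"), (4, "01234"), (6, "-"), (7, "1234")]

def pvLoopB : List (Int × Char) → Bool
  | [] => true
  | (idx, ch) :: rest =>
    match pvTable.get? idx with
    | some req => if !(PySem.Chars.isIn [ch] req.toList) then false else pvLoopB rest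
    | none => if !(PySem.Chars.isdigit ch) then false else pvLoopB rest

def check_id_format_alt (id_user : String) : Bool :=
  if PySem.Str.len id_user != 14 then false
  else pvLoopB (PySem.List.enumerate id_user.toList 0)

-- ===== PRECONDITION & SPEC =====
def Spec_check_id_format (id_user : String) (out : Bool) : Prop := out = check_id_format_alt id_user
instance (id_user : String) (out : Bool) : Decidable (Spec_check_id_format id_user out) := by unfold Spec_check_id_format; infer_instance

-- ===== CLAIM (what is proved, stated in full; the proofs are below) =====
def Claim_equal_check_id_format : Prop := ∀ (id_user : String), Dom_check_id_format id_user → Spec_check_id_format id_user (check_id_format id_user)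

-- ===== LEMMAS AND PROOFS =====
theorem pv_list14 (l : List Char) (h : l.length = 14) :
    ∃ c0 c1 c2 c3 c4 c5 c6 c7 c8 c9 c10 c11 c12 c13,
      l = [c0,c1,c2,c3,c4,c5,c6,c7,c8,c9,c10,c11,c12,c13] := by
  rcases l with _|⟨c0,l⟩; · simp at h
  rcases l with _|⟨c1,l⟩; · simp at h
  rcases l with _|⟨c2,l⟩; · simp at h
  rcases l with _|⟨c3,l⟩; · simp at h
  rcases l with _|⟨c4,l⟩; · simp at h
  rcases l with _|⟨c5,l⟩; · simp at h
  rcases l with _|⟨c6,l⟩; · simp at h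
  rcases l with _|⟨c7,l⟩; · simp at h
  rcases l with _|⟨c8,l⟩; · simp at h
  rcases l with _|⟨c9,l⟩; · simp at h
  rcases l with _|⟨c10,l⟩; · simp at h
  rcases l with _|⟨c11,l⟩; · simp at h
  rcases l with _|⟨c12,l⟩; · simp at h
  rcases l with _|⟨c13,l⟩; · simp at h
  rcases l with _|⟨c14,l⟩
  · exact ⟨c0,c1,c2,c3,c4,c5,c6,c7,c8,c9,c10,c11,c12,c13, rfl⟩
  · simp at h
theorem pv_ofList_eq (c d : Char) : (String.ofList [c] = String.ofList [d]) ↔ c = d := by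
  rw [String.ofList_inj]; simp
theorem pv_go_singleton (c : Char) : ∀ (fuel : Nat) (l : List Char) (acc : Nat), l.length ≤ fuel →
    PySem.Chars.count.go [c] fuel l acc = acc + l.count c := by
  intro fuel
  induction fuel with
  | zero => intro l acc h
            cases l with
            | nil => simp [PySem.Chars.count.go]
            | cons x t => simp at h
  | succ f ih =>
    intro l acc h
    cases l with
    | nil => simp [PySem.Chars.count.go]
    | cons x t =>
      simp only [PySem.Chars.count.go]
      by_cases hx : x = c
      · subst hx
        simp [List.isPrefixOf, ih t (acc + 1) (by simpa using h)]
        omega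
      · simp [List.isPrefixOf, hx, Ne.symm hx, ih t acc (by simpa using h)]
theorem pv_count_singleton (c : Char) (l : List Char) :
    PySem.Chars.count l [c] = l.count c := by
  simp [PySem.Chars.count, pv_go_singleton c l.length l 0 le_rfl]
theorem pv_isIn_singleton (c : Char) (l : List Char) :
    PySem.Chars.isIn [c] l = l.contains c := by
  rw [Bool.eq_iff_iff, PySem.Chars.isIn_iff_infix, List.singleton_infix_iff]
  simp
theorem pvLoopB_none (i : Int) (c : Char) (r : List (Int × Char)) (h : pvTable.get? i = none) :
    pvLoopB ((i,c)::r) = if !(PySem.Chars.isdigit c) then false else pvLoopB r := by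
  simp only [pvLoopB, h]
theorem pvLoopB_some (i : Int) (c : Char) (r : List (Int × Char)) (req : String) (h : pvTable.get? i = some req) :
    pvLoopB ((i,c)::r) = if !(PySem.Chars.isIn [c] req.toList) then false else pvLoopB r := by
  simp only [pvLoopB, h]
theorem pv_eq_lit0 (c : Char) : (String.ofList [c] = "0") ↔ c = '0' := by
  rw [show ("0":String) = String.ofList ['0'] from rfl, pv_ofList_eq]
theorem pv_eq_lit1 (c : Char) : (String.ofList [c] = "1") ↔ c = '1' := by
  rw [show ("1":String) = String.ofList ['1'] from rfl, pv_ofList_eq]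
theorem pv_eq_lit2 (c : Char) : (String.ofList [c] = "2") ↔ c = '2' := by
  rw [show ("2":String) = String.ofList ['2'] from rfl, pv_ofList_eq]
theorem pv_eq_lit3 (c : Char) : (String.ofList [c] = "3") ↔ c = '3' := by
  rw [show ("3":String) = String.ofList ['3'] from rfl, pv_ofList_eq]
theorem pv_eq_lit4 (c : Char) : (String.ofList [c] = "4") ↔ c = '4' := by
  rw [show ("4":String) = String.ofList ['4'] from rfl, pv_ofList_eq]

theorem check_id_format_len_ne (s : String) (h : s.length ≠ 14) :
    check_id_format s = false := by
  have h' : (((s.length : Int)) != 14) = true := by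
    simp only [bne_iff_ne, ne_eq]
    exact_mod_cast h
  simp only [check_id_format]
  cases hA : pvLoopA s.toList
  · simp
  · simp [PySem.Str.len_eq, h']

theorem check_id_format_alt_len_ne (s : String) (h : s.length ≠ 14) :
    check_id_format_alt s = false := by
  have h' : (((s.length : Int)) != 14) = true := by
    simp only [bne_iff_ne, ne_eq]
    exact_mod_cast h
  simp [check_id_format_alt, PySem.Str.len_eq, h']

theorem pv_equal (s : String) : check_id_format s = check_id_format_alt s := by
  by_cases hlen : s.length = 14
  · have h14 : s.toList.length = 14 := by simpa using hlen
    obtain ⟨c0,c1,c2,c3,c4,c5,c6,c7,c8,c9,c10,c11,c12,c13, hcs⟩ := pv_list14 _ h14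
    have t0 : pvTable.get? 0 = none := by decide
    have t1 : pvTable.get? 1 = none := by decide
    have t2 : pvTable.get? 2 = some "01" := by decide
    have t3 : pvTable.get? 3 = none := by decide
    have t4 : pvTable.get? 4 = some "01234" := by decide
    have t5 : pvTable.get? 5 = none := by decide
    have t6 : pvTable.get? 6 = some "-" := by decide
    have t7 : pvTable.get? 7 = some "1234" := by decide
    have t8 : pvTable.get? 8 = none := by decide
    have t9 : pvTable.get? 9 = none := by decide
    have t10 : pvTable.get? 10 = none := by decide
    have t11 : pvTable.get? 11 = none := by decide
    have t12 : pvTable.get? 12 = none := by decide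
    have t13 : pvTable.get? 13 = none := by decide
    have hs2 : PySem.List.slice ((PySem.List.pyRange 0 5 1).map PySem.Int.toStr) none (some 2) = ["0","1"] := by decide
    have hs5 : PySem.List.slice ((PySem.List.pyRange 0 5 1).map PySem.Int.toStr) none (some 5) = ["0","1","2","3","4"] := by decide
    have hs1 : PySem.List.slice ((PySem.List.pyRange 0 5 1).map PySem.Int.toStr) (some 1) none = ["1","2","3","4"] := by decide
    simp only [check_id_format, check_id_format_alt, PySem.Str.count_eq, PySem.Str.len_eq, hcs,
      PySem.List.enumerate_cons, PySem.List.enumerate_nil]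
    norm_num
    rw [pvLoopB_none _ _ _ t0, pvLoopB_none _ _ _ t1, pvLoopB_some _ _ _ _ t2,
        pvLoopB_none _ _ _ t3, pvLoopB_some _ _ _ _ t4, pvLoopB_none _ _ _ t5,
        pvLoopB_some _ _ _ _ t6, pvLoopB_some _ _ _ _ t7, pvLoopB_none _ _ _ t8,
        pvLoopB_none _ _ _ t9, pvLoopB_none _ _ _ t10, pvLoopB_none _ _ _ t11,
        pvLoopB_none _ _ _ t12, pvLoopB_none _ _ _ t13]
    simp [pvLoopA, pvLoopB, PySem.List.pyGetD_ofNat', hs2, hs5, hs1, pv_isIn_singleton, pv_count_singleton,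
      List.count_cons, pv_eq_lit0, pv_eq_lit1, pv_eq_lit2, pv_eq_lit3, pv_eq_lit4,
      show ("-":String).toList = ['-'] from rfl,
      show ("01":String).toList = ['0','1'] from rfl,
      show ("01234":String).toList = ['0','1','2','3','4'] from rfl,
      show ("1234":String).toList = ['1','2','3','4'] from rfl]
    rw [Bool.eq_iff_iff]
    simp only [Bool.and_eq_true, Bool.or_eq_true, decide_eq_true_eq]
    constructor
    · rintro ⟨⟨h0,h1,h2,h3,h4,h5,h6,h7,h8,h9,h10,h11,h12,h13⟩, ⟨⟨⟨hm2, hm4⟩, hcount⟩, hc6⟩, hm7⟩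
      subst hc6
      have n0 : c0 ≠ '-' := by rintro rfl; simp at hcount <;> omega
      have n1 : c1 ≠ '-' := by rintro rfl; simp at hcount <;> omega
      have n3 : c3 ≠ '-' := by rintro rfl; simp at hcount <;> omega
      have n5 : c5 ≠ '-' := by rintro rfl; simp at hcount <;> omega
      have n8 : c8 ≠ '-' := by rintro rfl; simp at hcount <;> omega
      have n9 : c9 ≠ '-' := by rintro rfl; simp at hcount <;> omega
      have n10 : c10 ≠ '-' := by rintro rfl; simp at hcount <;> omega
      have n11 : c11 ≠ '-' := by rintro rfl; simp at hcount <;> omega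
      have n12 : c12 ≠ '-' := by rintro rfl; simp at hcount <;> omega
      have n13 : c13 ≠ '-' := by rintro rfl; simp at hcount <;> omega
      exact ⟨h0.resolve_right n0, h1.resolve_right n1, hm2, h3.resolve_right n3, hm4,
        h5.resolve_right n5, rfl, hm7, h8.resolve_right n8, h9.resolve_right n9,
        h10.resolve_right n10, h11.resolve_right n11, h12.resolve_right n12, h13.resolve_right n13⟩
    · rintro ⟨g0,g1,g2,g3,g4,g5,g6,g7,g8,g9,g10,g11,g12,g13⟩
      subst g6
      have d2 : PySem.Chars.isdigit c2 := by rcases g2 with rfl|rfl <;> decide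
      have d4 : PySem.Chars.isdigit c4 := by rcases g4 with rfl|rfl|rfl|rfl|rfl <;> decide
      have d7 : PySem.Chars.isdigit c7 := by rcases g7 with rfl|rfl|rfl|rfl <;> decide
      have ne : ∀ c : Char, PySem.Chars.isdigit c → c ≠ '-' := by
        intro c hd h; rw [h] at hd; exact absurd hd (by decide)
      refine ⟨⟨Or.inl g0, Or.inl g1, Or.inl d2, Or.inl g3, Or.inl d4, Or.inl g5, Or.inr rfl,
        Or.inl d7, Or.inl g8, Or.inl g9, Or.inl g10, Or.inl g11, Or.inl g12, Or.inl g13⟩,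
        ⟨⟨⟨g2, g4⟩, ?_⟩, rfl⟩, g7⟩
      simp [ne _ g0, ne _ g1, ne _ d2, ne _ g3, ne _ d4, ne _ g5, ne _ d7,
        ne _ g8, ne _ g9, ne _ g10, ne _ g11, ne _ g12, ne _ g13]
  · rw [check_id_format_len_ne s hlen, check_id_format_alt_len_ne s hlen]

-- ===== VERDICT (by name: the statement is the Claim_ definition above) =====
theorem check_id_format_spec : Claim_equal_check_id_format := by
  intro s _
  unfold Spec_check_id_format
  exact pv_equal s
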